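-- pv_equiv track=rewrite | github.com/jonathanengelbert/data_structures_and_algos | algos/hackerrank/valley_counter.py | valley_counter
-- ===== SOURCE A (Python) =====
-- def valley_counter(n, s):
--     valley_count = 0
--     altitude = 0
--     in_valley = False
--
--     for step in s:
--         if step == 'U':
--             altitude += 1
--         if step == 'D':
--             altitude -= 1
--
--         if altitude <= -1 and not in_valley:
--             in_valley = True
--         if altitude is 0 and in_valley:
--             in_valley = False
--             valley_count += 1
--
--     return valley_count
-- ===== SOURCE B (Python) =====
-- def valley_counter(n, s):
--     # Staged pipeline: map steps to deltas, build the prefix-altitude list,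
--     # then count adjacent altitude pairs (-1, 0) -- each such pair is one
--     # valley ending (an up-step returning to sea level from below).
--     deltas = [1 if c == 'U' else (-1 if c == 'D' else 0) for c in s]
--     alts = [0]
--     for d in deltas:
--         alts.append(alts[-1] + d)
--     return sum(1 for prev, cur in zip(alts, alts[1:]) if prev == -1 and cur == 0)
-- ===== Notes on version B (the rewrite author's own statement) =====
-- stated objective: alternative
-- what changed: Replaced A's single-pass mutable state machine (altitude + in_valley flag) with a staged pipeline: map steps to deltas, materialise the full prefix-altitude list, then count adjacent altitude pairs (-1, 0).
import Mathlib
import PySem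

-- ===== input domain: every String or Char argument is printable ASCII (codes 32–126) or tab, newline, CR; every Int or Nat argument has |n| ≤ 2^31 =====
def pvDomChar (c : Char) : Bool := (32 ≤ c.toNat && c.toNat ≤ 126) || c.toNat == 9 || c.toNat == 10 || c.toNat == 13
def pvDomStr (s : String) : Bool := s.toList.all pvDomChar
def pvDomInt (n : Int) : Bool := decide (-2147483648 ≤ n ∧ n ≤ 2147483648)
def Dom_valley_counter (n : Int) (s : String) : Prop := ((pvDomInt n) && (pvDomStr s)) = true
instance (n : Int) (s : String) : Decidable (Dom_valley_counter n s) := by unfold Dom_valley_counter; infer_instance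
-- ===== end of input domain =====

-- B replaces A's single-pass mutable state machine (altitude + in_valley flag) with a
-- staged pipeline: map to deltas, build the prefix-altitude list, count adjacent (-1,0)
-- pairs (objective: alternative).

-- ===== PORT A =====
-- state: (valley_count, altitude, in_valley)
def vcStepA (st : Int × Int × Bool) (step : Char) : Int × Int × Bool :=
  let a1 := if step = 'U' then st.2.1 + 1 else st.2.1
  let a2 := if step = 'D' then a1 - 1 else a1
  let iv1 := if a2 ≤ -1 ∧ ¬ st.2.2 then true else st.2.2
  -- Python's 'altitude is 0' behaves as '== 0' here (small-int identity)
  if a2 = 0 ∧ iv1 then (st.1 + 1, a2, false) else (st.1, a2, iv1)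

def valley_counter (n : Int) (s : String) : Int :=
  (s.toList.foldl vcStepA (0, 0, false)).1

-- ===== PORT B =====
def vcDelta (c : Char) : Int := if c = 'U' then 1 else if c = 'D' then -1 else 0

-- sum(1 for prev, cur in zip(alts, alts[1:]) if prev == -1 and cur == 0)
def vcPairCount (alts : List Int) : Int :=
  ((alts.zip alts.tail).filter (fun p => p.1 == -1 && p.2 == 0)).length

def valley_counter_alt (n : Int) (s : String) : Int :=
  let deltas := s.toList.map vcDelta
  let alts := deltas.foldl (fun acc d => acc ++ [acc.getLast! + d]) ([0] : List Int)
  vcPairCount alts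

-- ===== PRECONDITION & SPEC =====
def Spec_valley_counter (n : Int) (s : String) (out : Int) : Prop := out = valley_counter_alt n s
instance (n : Int) (s : String) (out : Int) : Decidable (Spec_valley_counter n s out) := by unfold Spec_valley_counter; infer_instance

-- ===== CLAIM =====
def Claim_equal_valley_counter : Prop := ∀ (n : Int) (s : String), Dom_valley_counter n s → Spec_valley_counter n s (valley_counter n s)

-- ===== LEMMAS AND PROOFS =====

-- The append-building loop of B computes a scanl of running sums.
theorem vcBuild_eq_scanl (ds : List Int) : ∀ (pre : List Int) (a : Int),
    ds.foldl (fun acc d => acc ++ [acc.getLast! + d]) (pre ++ [a])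
      = pre ++ List.scanl (· + ·) a ds := by
  induction ds with
  | nil => intro pre a; simp [List.scanl]
  | cons d t ih =>
    intro pre a
    simp only [List.foldl_cons, List.scanl]
    have hlast : (pre ++ [a]).getLast! = a := by simp
    rw [hlast]
    have := ih (pre ++ [a]) (a + d)
    simpa using this

-- One counting step on an explicit two-headed list.
theorem vcPairCount_cons_cons (a b : Int) (t : List Int) :
    vcPairCount (a :: b :: t) = (if a = -1 ∧ b = 0 then 1 else 0) + vcPairCount (b :: t) := by
  simp only [vcPairCount, List.zip, List.tail, List.zipWith, List.filter]
  by_cases h : a = -1 ∧ b = 0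
  · simp [h.1, h.2]; omega
  · have : ((a == -1) && (b == 0)) = false := by
      simp only [Bool.and_eq_false_iff, beq_eq_false_iff_ne]; tauto
    simp [this, h]

-- scanl always starts with its seed.
theorem vcScanl_head (a : Int) (ds : List Int) :
    ∃ t, List.scanl (· + ·) a ds = a :: t := by
  cases ds with
  | nil => exact ⟨[], by simp⟩
  | cons e t => exact ⟨_, List.scanl_cons ..⟩

-- Pair counting on a scanl unfolds one step at a time.
theorem vcPairCount_scanl_cons (a d : Int) (ds : List Int) :
    vcPairCount (List.scanl (· + ·) a (d :: ds))
      = (if a = -1 ∧ a + d = 0 then 1 else 0) + vcPairCount (List.scanl (· + ·) (a + d) ds) := by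
  obtain ⟨t, ht⟩ := vcScanl_head (a + d) ds
  rw [List.scanl_cons, ht, vcPairCount_cons_cons]

-- Main invariant: A's fold from altitude a with in_valley = (a < 0) counts exactly
-- the (-1, 0) adjacent pairs of the altitude scanl over the remaining steps.
theorem vc_main (chars : List Char) : ∀ (c a : Int),
    (chars.foldl vcStepA (c, a, decide (a < 0))).1
      = c + vcPairCount (List.scanl (· + ·) a (chars.map vcDelta)) := by
  induction chars with
  | nil =>
    intro c a
    simp [vcPairCount, List.scanl]
  | cons ch t ih =>
    intro c a
    have hstep : vcStepA (c, a, decide (a < 0)) ch =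
        ((if a = -1 ∧ a + vcDelta ch = 0 then c + 1 else c),
          a + vcDelta ch, decide (a + vcDelta ch < 0)) := by
      simp only [vcStepA, vcDelta]
      by_cases hU : ch = 'U' <;> by_cases hD : ch = 'D' <;>
        simp only [hU, hD] <;> split_ifs <;> simp_all <;> omega
    simp only [List.foldl_cons, List.map_cons]
    rw [hstep, vcPairCount_scanl_cons, ih]
    split_ifs <;> ring

-- ===== VERDICT =====
theorem valley_counter_spec : Claim_equal_valley_counter := by
  intro n s _
  unfold Spec_valley_counter valley_counter valley_counter_alt
  have h := vc_main s.toList 0 0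
  have hb := vcBuild_eq_scanl (s.toList.map vcDelta) [] 0
  simp only [List.nil_append] at hb
  simp only []
  rw [hb]
  simpa using h
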